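-- pv_equiv track=rewrite | github.com/NQBH/advanced_STEM_beyond | combinatorics/resource/TMD/graph_tree/Code/Problem05/exercise1.9.py | previous_sibling
-- ===== SOURCE A (Python) =====
-- from typing import List, Optional
--
-- def previous_sibling(v: int, parent_array: List[int]) -> Optional[int]:
--     """
--     Exercise 1.9: Implements the T.previous_sibling(v) operation.
--
--     This function finds the sibling of a node `v` that appears immediately
--     before it, based on the node index ordering. It operates on the
--     array-of-parents representation of a tree.
--
--     The algorithm is as follows:
--     1. Find the parent `p` of the given node `v`. If `v` is the root, it has no siblings.
--     2. Iterate from the beginning of the array up to `v-1`.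
--     3. Keep track of the last node `i` encountered such that parent[i] == p.
--     4. This last node found is the immediate previous sibling.
--
--     :param v: The node whose previous sibling is to be found.
--     :param parent_array: The tree represented as a list of parents. parent_array[i] is the
--                          parent of node i. The root's parent is -1.
--     :return: The index of the previous sibling if one exists, otherwise None.
--     """
--     # Validate input node index
--     if not (0 <= v < len(parent_array)):
--         return None
--
--     parent = parent_array[v]
--
--     # The root has no parent, and thus no siblings.
--     if parent == -1:
--         return None
--
--     prev_sibling = None
--
--     # Iterate through all nodes with index less than v.
--     for i in range(v):
--         # If node `i` has the same parent, it is an earlier sibling.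
--         if parent_array[i] == parent:
--             # Keep updating, so we end up with the one with the largest index less than v.
--             prev_sibling = i
--
--     return prev_sibling
-- ===== SOURCE B (Python) =====
-- from typing import List, Optional
--
-- def previous_sibling(v: int, parent_array: List[int]) -> Optional[int]:
--     """Scan backwards from v-1 and return the first node with the same parent."""
--     if not (0 <= v < len(parent_array)):
--         return None
--     parent = parent_array[v]
--     if parent == -1:
--         return None
--     for i in range(v - 1, -1, -1):
--         if parent_array[i] == parent:
--             return i
--     return None
-- ===== Notes on version B (the rewrite author's own statement) =====
-- stated objective: idiomatic
-- what changed: Forward scan that keeps overwriting a prev_sibling accumulator is replaced by a backward scan from v-1 that returns the first match immediately, with no accumulator state.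
import Mathlib
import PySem

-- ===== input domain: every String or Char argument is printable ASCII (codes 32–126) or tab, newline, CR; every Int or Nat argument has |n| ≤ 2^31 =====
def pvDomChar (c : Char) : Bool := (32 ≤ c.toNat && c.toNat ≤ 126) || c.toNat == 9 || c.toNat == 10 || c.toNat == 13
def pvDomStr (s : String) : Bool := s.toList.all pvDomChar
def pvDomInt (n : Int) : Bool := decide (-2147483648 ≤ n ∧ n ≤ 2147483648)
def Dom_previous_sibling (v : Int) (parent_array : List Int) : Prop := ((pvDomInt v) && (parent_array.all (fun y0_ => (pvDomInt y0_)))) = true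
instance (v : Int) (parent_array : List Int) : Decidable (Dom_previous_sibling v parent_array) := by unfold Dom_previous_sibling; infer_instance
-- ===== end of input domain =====

-- B replaces A's forward scan with accumulator by a backward scan returning the first match; return value unchanged.

-- ===== PORT A =====
-- A: guards, then forward loop over range(v) overwriting prev_sibling on every match.
def previous_sibling (v : Int) (parent_array : List Int) : Option Int :=
  if ¬ (0 ≤ v ∧ v < (parent_array.length : Int)) then none
  else
    match PySem.List.pyGet? parent_array v with
    | none => none
    | some parent =>
      if parent = -1 then none
      else
        (PySem.List.pyRange 0 v 1).foldl
          (fun prev i =>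
            if PySem.List.pyGetD parent_array i 0 = parent then some i else prev)
          none

-- ===== PORT B =====
-- B's loop 'for i in range(v-1, -1, -1): if match: return i' as structural recursion on the count of remaining indices.
def psAltFind (parent_array : List Int) (parent : Int) : Nat → Option Int
  | 0 => none
  | n + 1 =>
    if PySem.List.pyGetD parent_array (n : Int) 0 = parent then some (n : Int)
    else psAltFind parent_array parent n

def previous_sibling_alt (v : Int) (parent_array : List Int) : Option Int :=
  if ¬ (0 ≤ v ∧ v < (parent_array.length : Int)) then none
  else
    match PySem.List.pyGet? parent_array v with
    | none => none
    | some parent =>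
      if parent = -1 then none
      else psAltFind parent_array parent v.toNat

-- ===== PRECONDITION & SPEC =====
def Spec_previous_sibling (v : Int) (parent_array : List Int) (out : Option Int) : Prop := out = previous_sibling_alt v parent_array
instance (v : Int) (parent_array : List Int) (out : Option Int) : Decidable (Spec_previous_sibling v parent_array out) := by unfold Spec_previous_sibling; infer_instance

-- ===== CLAIM (what is proved, stated in full; the proofs are below) =====
def Claim_equal_previous_sibling : Prop := ∀ (v : Int) (parent_array : List Int), Dom_previous_sibling v parent_array → Spec_previous_sibling v parent_array (previous_sibling v parent_array)

-- ===== LEMMAS AND PROOFS =====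

-- A's fold over [0, …, n-1] (last match) equals B's backward first-match scan.
lemma fold_eq_find (pa : List Int) (p : Int) (n : Nat) :
    (PySem.List.pyRange 0 (n : Int) 1).foldl
      (fun prev i => if PySem.List.pyGetD pa i 0 = p then some i else prev) none
    = psAltFind pa p n := by
  induction n with
  | zero => simp [PySem.List.pyRange_one_eq_nil, psAltFind]
  | succ n ih =>
    have h : PySem.List.pyRange 0 ((n : Int) + 1) 1
        = PySem.List.pyRange 0 (n : Int) 1 ++ [(n : Int)] :=
      PySem.List.pyRange_one_succ_right (by exact_mod_cast Nat.zero_le n)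
    push_cast
    rw [h, List.foldl_append]
    simp only [List.foldl, psAltFind]
    split_ifs with hc <;> simp [ih]

theorem previous_sibling_spec : Claim_equal_previous_sibling := by
  intro v pa _
  unfold Spec_previous_sibling previous_sibling previous_sibling_alt
  by_cases hg : 0 ≤ v ∧ v < (pa.length : Int)
  · rw [if_neg (not_not_intro hg), if_neg (not_not_intro hg)]
    cases hget : PySem.List.pyGet? pa v with
    | none => rfl
    | some parent =>
      dsimp only
      split_ifs with hp
      · rfl
      · have hv : v = (v.toNat : Int) := (Int.toNat_of_nonneg hg.1).symm
        rw [hv]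
        exact fold_eq_find pa parent v.toNat
  · simp [hg]
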